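-- pv_equiv track=rewrite | github.com/sagieinav/obsidian-cs-knowledge-base | 20 Education/23 Semester 1/23.01 Computer Science Intro/3 Tasks/3.6 Functions.py | new_number_from_min_digits
-- ===== SOURCE A (Python) =====
-- def new_number_from_min_digits(num1, num2):
--     res = 0
--     dig_pos = 0
--
--     while num1 != 0:
--         if num2 == 0:
--             return -1
--
--         num1_dig = num1 % 10
--         num2_dig = num2 % 10
--         if num1_dig < num2_dig:
--             min_dig = num1_dig
--         else:
--             min_dig = num2_dig
--
--         res += min_dig * 10 ** dig_pos
--         dig_pos += 1
--
--         num1 //= 10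
--         num2 //= 10
--
--     if num2 != 0:
--         return -1
--     return res
-- ===== SOURCE B (Python) =====
-- def _digits(n):
--     # least-significant-first decimal digits; 0 has no digits
--     ds = []
--     while n != 0:
--         ds.append(n % 10)
--         n //= 10
--     return ds
--
--
-- def new_number_from_min_digits(num1, num2):
--     if num1 < 0 or num2 < 0:
--         return -1
--     d1 = _digits(num1)
--     d2 = _digits(num2)
--     if len(d1) != len(d2):
--         return -1
--     res = 0
--     for a, b in zip(reversed(d1), reversed(d2)):
--         res = res * 10 + min(a, b)
--     return res
-- ===== Notes on version B (the rewrite author's own statement) =====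
-- stated objective: alternative
-- what changed: Replaces A's fused positional while-loop (accumulating min_dig * 10**dig_pos) by a staged pipeline: extract each number's decimal digit list, compare lengths, then fold the reversed zipped lists MSB-first with res = res*10 + min(a, b); negatives, on which A just reports -1 where it terminates, are rejected up front.
import Mathlib
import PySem

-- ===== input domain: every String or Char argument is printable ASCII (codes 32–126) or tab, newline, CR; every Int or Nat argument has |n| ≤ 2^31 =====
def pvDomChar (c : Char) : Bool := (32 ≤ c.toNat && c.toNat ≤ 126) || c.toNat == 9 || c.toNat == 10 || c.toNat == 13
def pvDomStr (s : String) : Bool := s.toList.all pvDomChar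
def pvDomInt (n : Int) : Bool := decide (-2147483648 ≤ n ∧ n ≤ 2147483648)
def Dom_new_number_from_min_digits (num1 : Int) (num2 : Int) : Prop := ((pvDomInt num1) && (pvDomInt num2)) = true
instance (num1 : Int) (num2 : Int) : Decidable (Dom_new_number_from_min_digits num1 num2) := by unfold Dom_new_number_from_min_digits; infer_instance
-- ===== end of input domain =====

-- B replaces A's fused positional while-loop by a staged pipeline (digit lists, length check,
-- MSB-first fold over the reversed zip); equivalence on Pre_ (A never terminates when both
-- operands are negative).

-- ===== PORT A =====
-- A's while-loop, with a fuel counter as totality guard only: on every input admitted by Pre_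
-- the initial fuel num1.natAbs + num2.natAbs + 1 exceeds the number of loop iterations Python
-- performs, so the fuel-exhausted branch is unreachable there (Python loops forever exactly on
-- num1 < 0 ∧ num2 < 0, which Pre_ excludes).
def pvALoop : Nat → Int → Int → Int → Nat → Int
  | 0, _, _, _, _ => -1
  | fuel+1, num1, num2, res, dig_pos =>
    if num1 = 0 then
      (if num2 ≠ 0 then -1 else res)
    else if num2 = 0 then -1
    else
      let num1_dig := PySem.Int.mod num1 10
      let num2_dig := PySem.Int.mod num2 10
      let min_dig := if num1_dig < num2_dig then num1_dig else num2_dig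
      pvALoop fuel (PySem.Int.floordiv num1 10) (PySem.Int.floordiv num2 10)
        (res + min_dig * 10 ^ dig_pos) (dig_pos + 1)

def new_number_from_min_digits (num1 : Int) (num2 : Int) : Int :=
  pvALoop (num1.natAbs + num2.natAbs + 1) num1 num2 0 0

-- ===== PORT B =====
-- B's _digits helper (LSB-first digit list of n), with a fuel counter as totality guard only:
-- B calls it with fuel n.natAbs + 1, which exceeds the digit count for every n ≥ 0 it is
-- called on (B's sign guard rejects negatives before this helper runs).
def pvDigits : Nat → Int → List Int
  | 0, _ => []
  | fuel+1, n =>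
    if n = 0 then []
    else PySem.Int.mod n 10 :: pvDigits fuel (PySem.Int.floordiv n 10)

def new_number_from_min_digits_alt (num1 : Int) (num2 : Int) : Int :=
  if num1 < 0 ∨ num2 < 0 then -1
  else if (pvDigits (num1.natAbs + 1) num1).length ≠ (pvDigits (num2.natAbs + 1) num2).length
    then -1
  else (List.zip (pvDigits (num1.natAbs + 1) num1).reverse
        (pvDigits (num2.natAbs + 1) num2).reverse).foldl
    (fun res p => res * 10 + min p.1 p.2) 0

-- ===== PRECONDITION & SPEC =====
-- Pre_ excludes only num1 < 0 ∧ num2 < 0, on which Python A never terminates (both '//= 10' stall at -1).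
def Pre_new_number_from_min_digits (num1 : Int) (num2 : Int) : Prop := ¬ (num1 < 0 ∧ num2 < 0)
instance (num1 : Int) (num2 : Int) : Decidable (Pre_new_number_from_min_digits num1 num2) := by unfold Pre_new_number_from_min_digits; infer_instance
def pvWitness_new_number_from_min_digits : Int × Int := (19, 91)

def Spec_new_number_from_min_digits (num1 : Int) (num2 : Int) (out : Int) : Prop := out = new_number_from_min_digits_alt num1 num2
instance (num1 : Int) (num2 : Int) (out : Int) : Decidable (Spec_new_number_from_min_digits num1 num2 out) := by unfold Spec_new_number_from_min_digits; infer_instance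

-- ===== CLAIM (what is proved, stated in full; the proofs are below) =====
def Claim_equal_new_number_from_min_digits : Prop := ∀ (num1 : Int) (num2 : Int), Dom_new_number_from_min_digits num1 num2 → Pre_new_number_from_min_digits num1 num2 → Spec_new_number_from_min_digits num1 num2 (new_number_from_min_digits num1 num2)

-- ===== LEMMAS AND PROOFS =====

theorem pv_fdiv10 (a : Int) : PySem.Int.floordiv a 10 = a / 10 :=
  PySem.Int.floordiv_eq_ediv_of_pos (by norm_num)

-- pvDigits is fuel-irrelevant once the fuel exceeds the digit count.
theorem pvDigits_fuel (n : Int) (h : 0 ≤ n) : ∀ (fuel : Nat), n.natAbs < fuel →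
    pvDigits fuel n = pvDigits (n.natAbs + 1) n := by
  intro fuel hf
  obtain ⟨f, rfl⟩ : ∃ f, fuel = f + 1 := ⟨fuel - 1, by omega⟩
  by_cases h0 : n = 0
  · subst h0; simp [pvDigits]
  · have hq : 0 ≤ PySem.Int.floordiv n 10 := by rw [pv_fdiv10]; omega
    have hlt : (PySem.Int.floordiv n 10).natAbs < n.natAbs := by rw [pv_fdiv10]; omega
    simp only [pvDigits, if_neg h0]
    rw [pvDigits_fuel (PySem.Int.floordiv n 10) hq f (by omega),
        pvDigits_fuel (PySem.Int.floordiv n 10) hq n.natAbs (by omega)]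
termination_by n.toNat
decreasing_by all_goals (simp only [pv_fdiv10]; omega)

-- canonical digit list (the fuel B actually passes)
def pvDigs (n : Int) : List Int := pvDigits (n.natAbs + 1) n

theorem pvDigs_zero : pvDigs 0 = [] := by simp [pvDigs, pvDigits]

theorem pvDigs_pos (n : Int) (h : 0 < n) :
    pvDigs n = PySem.Int.mod n 10 :: pvDigs (PySem.Int.floordiv n 10) := by
  have hq : 0 ≤ PySem.Int.floordiv n 10 := by rw [pv_fdiv10]; omega
  have hlt : (PySem.Int.floordiv n 10).natAbs < n.natAbs := by rw [pv_fdiv10]; omega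
  unfold pvDigs
  conv_lhs => rw [pvDigits]
  rw [if_neg (by omega : ¬ n = 0),
      pvDigits_fuel (PySem.Int.floordiv n 10) hq n.natAbs (by omega)]

theorem pvDigs_ne_nil (n : Int) (h : 0 < n) : pvDigs n ≠ [] := by
  rw [pvDigs_pos n h]
  simp

-- B's MSB-first combined value, as a function of the two numbers.
def pvComb (n1 n2 : Int) : Int :=
  (List.zip (pvDigs n1).reverse (pvDigs n2).reverse).foldl
    (fun res p => res * 10 + min p.1 p.2) 0

-- Peeling the heads off B's fold: with equal-length tails, the fold over cons-reverse-zip is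
-- the tail fold times 10 plus the min of the heads.
theorem pv_fold_cons (x y : Int) (d1 d2 : List Int) (hlen : d1.length = d2.length) :
    (List.zip (x :: d1).reverse (y :: d2).reverse).foldl
        (fun res p => res * 10 + min p.1 p.2) 0 =
      (List.zip d1.reverse d2.reverse).foldl (fun res p => res * 10 + min p.1 p.2) 0 * 10
        + min x y := by
  have h : (x :: d1).reverse = d1.reverse ++ [x] := by simp
  have h2 : (y :: d2).reverse = d2.reverse ++ [y] := by simp
  rw [h, h2, List.zip_append (by simp [hlen])]
  simp

-- pvComb satisfies the Horner recursion that A's loop realises positionally.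
theorem pvComb_step (n1 n2 : Int) (h1 : 0 < n1) (h2 : 0 < n2)
    (hlen : (pvDigs (PySem.Int.floordiv n1 10)).length
          = (pvDigs (PySem.Int.floordiv n2 10)).length) :
    pvComb n1 n2 = pvComb (PySem.Int.floordiv n1 10) (PySem.Int.floordiv n2 10) * 10
      + min (PySem.Int.mod n1 10) (PySem.Int.mod n2 10) := by
  unfold pvComb
  rw [pvDigs_pos n1 h1, pvDigs_pos n2 h2, pv_fold_cons _ _ _ _ hlen]

-- With a negative first operand and a nonnegative second, A's loop always exits with -1.
theorem pvALoop_neg (num1 num2 res : Int) (dig_pos : Nat) (h1 : num1 < 0) (h2 : 0 ≤ num2) :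
    ∀ (fuel : Nat), num2.natAbs < fuel → pvALoop fuel num1 num2 res dig_pos = -1 := by
  intro fuel hf
  obtain ⟨f, rfl⟩ : ∃ f, fuel = f + 1 := ⟨fuel - 1, by omega⟩
  rw [pvALoop, if_neg (by omega)]
  by_cases hz : num2 = 0
  · rw [if_pos hz]
  · rw [if_neg hz]
    exact pvALoop_neg _ _ _ _ (by rw [pv_fdiv10]; omega) (by rw [pv_fdiv10]; omega) f
      (by rw [pv_fdiv10]; omega)
termination_by num2.toNat
decreasing_by all_goals (simp only [pv_fdiv10]; omega)

-- Symmetrically, with num1 ≥ 0 and num2 < 0 the loop drains num1 and exits with -1.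
theorem pvALoop_neg2 (num1 num2 res : Int) (dig_pos : Nat) (h1 : 0 ≤ num1) (h2 : num2 < 0) :
    ∀ (fuel : Nat), num1.natAbs < fuel → pvALoop fuel num1 num2 res dig_pos = -1 := by
  intro fuel hf
  obtain ⟨f, rfl⟩ : ∃ f, fuel = f + 1 := ⟨fuel - 1, by omega⟩
  rw [pvALoop]
  by_cases hz : num1 = 0
  · rw [if_pos hz, if_pos (by omega)]
  · rw [if_neg hz, if_neg (by omega)]
    exact pvALoop_neg2 _ _ _ _ (by rw [pv_fdiv10]; omega) (by rw [pv_fdiv10]; omega) f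
      (by rw [pv_fdiv10]; omega)
termination_by num1.toNat
decreasing_by all_goals (simp only [pv_fdiv10]; omega)

-- The central invariant: A's loop equals B's staged value shifted into position dig_pos,
-- guarded by the digit-count comparison.
theorem pvALoop_eq (num1 : Int) (h1 : 0 ≤ num1) : ∀ (num2 : Int), 0 ≤ num2 →
    ∀ (res : Int) (dig_pos : Nat) (fuel : Nat), num1.natAbs < fuel →
    pvALoop fuel num1 num2 res dig_pos =
      if (pvDigs num1).length = (pvDigs num2).length
      then res + pvComb num1 num2 * 10 ^ dig_pos else -1 := by
  intro num2 h2 res dig_pos fuel hf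
  obtain ⟨f, rfl⟩ : ∃ f, fuel = f + 1 := ⟨fuel - 1, by omega⟩
  rw [pvALoop]
  by_cases h0 : num1 = 0
  · by_cases hz : num2 = 0
    · subst h0 hz
      simp [pvDigs_zero, pvComb]
    · subst h0
      have hne : (pvDigs num2).length ≠ 0 :=
        fun h => pvDigs_ne_nil num2 (by omega) (List.length_eq_zero_iff.mp h)
      have hlen : ¬((pvDigs (0:Int)).length = (pvDigs num2).length) := by
        rw [pvDigs_zero]
        exact fun h => hne h.symm
      rw [if_pos rfl, if_pos hz, if_neg hlen]
  · have hp1 : 0 < num1 := by omega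
    by_cases hz : num2 = 0
    · have hne : (pvDigs num1).length ≠ 0 :=
        fun h => pvDigs_ne_nil num1 hp1 (List.length_eq_zero_iff.mp h)
      subst hz
      rw [if_neg h0, if_pos rfl, pvDigs_zero]
      rw [if_neg (by simpa using hne)]
    · have hp2 : 0 < num2 := by omega
      rw [if_neg h0, if_neg hz]
      have hq1 : 0 ≤ PySem.Int.floordiv num1 10 := by rw [pv_fdiv10]; omega
      have hq2 : 0 ≤ PySem.Int.floordiv num2 10 := by rw [pv_fdiv10]; omega
      rw [pvALoop_eq (PySem.Int.floordiv num1 10) hq1 (PySem.Int.floordiv num2 10) hq2 _ _ f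
          (by rw [pv_fdiv10]; omega)]
      have hmin : (if PySem.Int.mod num1 10 < PySem.Int.mod num2 10 then PySem.Int.mod num1 10
          else PySem.Int.mod num2 10) = min (PySem.Int.mod num1 10) (PySem.Int.mod num2 10) := by
        rw [min_comm]
        simp [min_def]
        split_ifs <;> omega
      have hlen : ((pvDigs num1).length = (pvDigs num2).length) ↔
          ((pvDigs (PySem.Int.floordiv num1 10)).length
            = (pvDigs (PySem.Int.floordiv num2 10)).length) := by
        rw [pvDigs_pos num1 hp1, pvDigs_pos num2 hp2]
        simp
      by_cases hl : (pvDigs (PySem.Int.floordiv num1 10)).length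
          = (pvDigs (PySem.Int.floordiv num2 10)).length
      · rw [if_pos hl, if_pos (hlen.mpr hl), pvComb_step num1 num2 hp1 hp2 hl, hmin]
        ring
      · rw [if_neg hl, if_neg (fun h => hl (hlen.mp h))]
termination_by num1.toNat
decreasing_by all_goals (simp only [pv_fdiv10]; omega)

-- ===== VERDICT (by name: the statement is the Claim_ definition above) =====
theorem new_number_from_min_digits_spec : Claim_equal_new_number_from_min_digits := by
  intro num1 num2 _ hpre
  unfold Spec_new_number_from_min_digits new_number_from_min_digits new_number_from_min_digits_alt
  unfold Pre_new_number_from_min_digits at hpre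
  by_cases h1 : 0 ≤ num1
  · by_cases h2 : 0 ≤ num2
    · rw [pvALoop_eq num1 h1 num2 h2 0 0 _ (by omega),
          if_neg (show ¬(num1 < 0 ∨ num2 < 0) by omega)]
      by_cases hl : (pvDigs num1).length = (pvDigs num2).length
      · rw [if_pos hl, if_neg (by simpa [pvDigs] using hl)]
        simp [pvComb, pvDigs]
      · rw [if_neg hl, if_pos (by simpa [pvDigs] using hl)]
    · rw [pvALoop_neg2 num1 num2 0 0 h1 (by omega) _ (by omega), if_pos (by omega)]
  · have h2 : 0 ≤ num2 := by omega
    rw [pvALoop_neg num1 num2 0 0 (by omega) h2 _ (by omega), if_pos (by omega)]
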